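-- pv_equiv track=rewrite | github.com/jasonhuh/CodeChef-Solutions | PPATTERN.py | getPettern
-- ===== SOURCE A (Python) =====
-- def getPettern(N):
--     ar = [[0]*N for _ in range(N)]
--     num, i = 1, 0
--     while num <= N*N:
--         for j in range(i+1):
--             if j < N and i - j < N:
--                 ar[j][i-j] = num
--                 num += 1
--         i += 1
--     return ar
-- ===== SOURCE B (Python) =====
-- def getPettern(N):
--     res = []
--     for r in range(N):
--         row = []
--         for c in range(N):
--             d = r + c
--             if d <= N:
--                 before = d * (d + 1) // 2
--             else:
--                 before = N * N - (2 * N - 1 - d) * (2 * N - d) // 2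
--             jstart = max(0, d - (N - 1))
--             row.append(before + (r - jstart) + 1)
--         res.append(row)
--     return res
-- ===== Notes on version B (the rewrite author's own statement) =====
-- stated objective: alternative
-- what changed: B computes each cell independently from its coordinates with a closed-form anti-diagonal formula (triangular-number prefix count + offset within the diagonal) in two nested loops, instead of A's sequential counter walked over diagonals with guarded in-place assignments.
import Mathlib
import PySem

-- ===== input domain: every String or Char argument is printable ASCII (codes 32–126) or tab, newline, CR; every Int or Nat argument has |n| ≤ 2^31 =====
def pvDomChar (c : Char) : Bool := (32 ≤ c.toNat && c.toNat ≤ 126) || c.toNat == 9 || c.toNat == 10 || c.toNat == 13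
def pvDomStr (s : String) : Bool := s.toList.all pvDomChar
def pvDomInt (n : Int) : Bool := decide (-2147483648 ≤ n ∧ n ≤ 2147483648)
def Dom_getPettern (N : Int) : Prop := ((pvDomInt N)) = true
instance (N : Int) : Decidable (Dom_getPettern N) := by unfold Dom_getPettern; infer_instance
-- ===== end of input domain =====

-- B replaces A's sequential diagonal-walking counter by a closed-form per-cell formula (alternative decomposition; equivalence of the return values is proved for all N ≥ 0).

-- ===== PORT A =====
-- one step of the inner 'for j in range(i+1)' body; in A's execution j and i-j are
-- always ≥ 0 (j ∈ [0,i]), so Python's indexing never wraps and .toNat is exact here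
def pvStepA (N i : Int) (s : List (List Int) × Int) (j : Int) : List (List Int) × Int :=
  if j < N ∧ i - j < N then
    (s.1.modify j.toNat (fun row => row.set (i - j).toNat s.2), s.2 + 1)
  else s

-- the 'while num <= N*N' loop, totalised with fuel; for N ≥ 0 the loop performs at
-- most 2*N iterations, so the fuel given below never runs out (N < 0, where the
-- Python loop diverges, is outside Pre_getPettern)
def pvLoopA (N : Int) : Nat → Int → Int → List (List Int) → List (List Int)
  | 0, _, _, ar => ar
  | fuel+1, num, i, ar =>
    if num ≤ N * N then
      let s := (PySem.List.pyRange 0 (i+1) 1).foldl (pvStepA N i) (ar, num)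
      pvLoopA N fuel s.2 (i+1) s.1
    else ar

def getPettern (N : Int) : List (List Int) :=
  pvLoopA N ((2 * N).toNat + 1) 1 0 (List.replicate N.toNat (List.replicate N.toNat 0))

-- ===== PORT B =====
def getPettern_alt (N : Int) : List (List Int) :=
  (PySem.List.pyRange 0 N 1).foldl (fun res r =>
    res ++ [(PySem.List.pyRange 0 N 1).foldl (fun row c =>
      let d := r + c
      let before := if d ≤ N then PySem.Int.floordiv (d * (d + 1)) 2
                    else N * N - PySem.Int.floordiv ((2*N - 1 - d) * (2*N - d)) 2
      let jstart := max 0 (d - (N - 1))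
      row ++ [before + (r - jstart) + 1]) []]) []

-- ===== PRECONDITION & SPEC =====
-- Pre_ excludes negative N, on which Python A never returns (the while loop runs forever: num keeps its initial value, which stays below N*N, and no cell is ever assigned)
def Pre_getPettern (N : Int) : Prop := 0 ≤ N
instance (N : Int) : Decidable (Pre_getPettern N) := by unfold Pre_getPettern; infer_instance
def pvWitness_getPettern : Int := 3
def Spec_getPettern (N : Int) (out : List (List Int)) : Prop := out = getPettern_alt N
instance (N : Int) (out : List (List Int)) : Decidable (Spec_getPettern N out) := by unfold Spec_getPettern; infer_instance

-- ===== CLAIM (what is proved, stated in full; the proofs are below) =====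
def Claim_equal_getPettern : Prop := ∀ (N : Int), Dom_getPettern N → Pre_getPettern N → Spec_getPettern N (getPettern N)

-- ===== LEMMAS AND PROOFS =====

-- B's per-cell value (exactly the body of B's inner loop)
def pvVal (N r c : Int) : Int :=
  (if r + c ≤ N then PySem.Int.floordiv ((r + c) * (r + c + 1)) 2
   else N*N - PySem.Int.floordiv ((2*N - 1 - (r + c)) * (2*N - (r + c))) 2)
  + (r - max 0 (r + c - (N - 1))) + 1

-- length of diagonal k in an n×n grid, and cells on diagonals < i
def pvLen (N : Int) (k : Nat) : Int := min (k : Int) (N - 1) - max 0 ((k : Int) - (N - 1)) + 1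
def pvCnt (N : Int) : Nat → Int
  | 0 => 0
  | i+1 => pvCnt N i + pvLen N i

-- number of valid j (cells on diagonal i) among j < a
def pvVc (N : Int) (i a : Nat) : Int := max 0 (min (a : Int) N - max 0 ((i : Int) - (N - 1)))

-- grid state: diagonals < i fully assigned, on diagonal i rows < a assigned
def pvGrid (N : Int) (n i a : Nat) : List (List Int) :=
  (List.range n).map (fun r => (List.range n).map (fun c =>
    if r + c < i ∨ (r + c = i ∧ r < a) then pvVal N r c else 0))

lemma pvCnt_closed (N : Int) (hN : 0 ≤ N) :
    ∀ d : Nat, (d : Int) ≤ 2*N - 1 →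
      2 * pvCnt N d = if (d : Int) ≤ N then (d : Int) * (d + 1) else 2*N*N - (2*N-1-d) * (2*N-d) := by
  intro d
  induction d with
  | zero => intro _; simp [pvCnt, hN]
  | succ d IH =>
    intro hd
    push_cast at hd ⊢
    have IH' := IH (by omega)
    show 2 * (pvCnt N d + pvLen N d) = _
    by_cases h1 : (d : Int) + 1 ≤ N
    · rw [if_pos h1]
      rw [if_pos (by omega)] at IH'
      have hlen : pvLen N d = (d : Int) + 1 := by unfold pvLen; omega
      rw [hlen]; linear_combination IH'
    · rw [if_neg h1]
      have hlen : pvLen N d = 2*N - 1 - d := by unfold pvLen; omega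
      rw [hlen]
      by_cases h2 : (d : Int) ≤ N
      · rw [if_pos h2] at IH'
        have hdN : (d : Int) = N := by omega
        rw [hdN] at IH' ⊢
        linear_combination IH'
      · rw [if_neg h2] at IH'
        linear_combination IH'

lemma pv_floordiv_two (t : Int) : PySem.Int.floordiv (2 * t) 2 = t := by
  rw [PySem.Int.floordiv_eq_ediv_of_pos (by norm_num)]
  exact Int.mul_ediv_cancel_left t (by norm_num)

lemma pvVal_eq (N : Int) (hN : 0 ≤ N) (r c : Nat) (h : (r : Int) + c ≤ 2*N - 2) :
    pvVal N r c = pvCnt N (r + c) + ((r : Int) - max 0 ((r : Int) + c - (N - 1))) + 1 := by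
  have hc := pvCnt_closed N hN (r + c) (by push_cast; omega)
  unfold pvVal
  by_cases h1 : (r : Int) + c ≤ N
  · rw [if_pos h1]
    rw [if_pos (by push_cast; omega)] at hc
    have : ((r : Int) + c) * ((r : Int) + c + 1) = 2 * pvCnt N (r + c) := by
      push_cast at hc ⊢; linear_combination -hc
    rw [this, pv_floordiv_two]
  · rw [if_neg h1]
    rw [if_neg (by push_cast; omega)] at hc
    have : (2*N - 1 - ((r : Int) + c)) * (2*N - ((r : Int) + c)) = 2 * (N*N - pvCnt N (r + c)) := by
      push_cast at hc ⊢; linear_combination hc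
    rw [this, pv_floordiv_two]
    ring

lemma pv_modify_set (n r₀ c₀ : Nat) (v : Int) (F : Nat → Nat → Int) :
    ((List.range n).map (fun r => (List.range n).map (fun c => F r c))).modify r₀
        (fun row => row.set c₀ v)
      = (List.range n).map (fun r => (List.range n).map (fun c =>
          if r = r₀ ∧ c = c₀ then v else F r c)) := by
  apply List.ext_getElem
  · simp [List.length_modify]
  · intro r h1 h2
    rw [List.getElem_modify]
    simp only [List.getElem_map, List.getElem_range] at *
    by_cases hr : r₀ = r
    · subst hr
      rw [if_pos rfl]
      apply List.ext_getElem
      · simp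
      · intro c hc1 hc2
        rw [List.getElem_set]
        simp only [List.getElem_map, List.getElem_range, List.length_map, List.length_range] at *
        by_cases hcc : c₀ = c
        · subst hcc; simp
        · rw [if_neg hcc, if_neg (by tauto)]
    · rw [if_neg hr]
      apply List.map_congr_left; intro c _
      rw [if_neg (by tauto)]

lemma pvGrid_congr {N : Int} {n i a i' a' : Nat}
    (h : ∀ r c, r < n → c < n →
      ((r + c < i ∨ (r + c = i ∧ r < a)) ↔ (r + c < i' ∨ (r + c = i' ∧ r < a')))) :
    pvGrid N n i a = pvGrid N n i' a' := by
  unfold pvGrid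
  apply List.map_congr_left; intro r hr
  apply List.map_congr_left; intro c hc
  rw [List.mem_range] at hr hc
  exact if_congr (h r c hr hc) rfl rfl

lemma pvStep_correct (N : Int) (hN : 0 ≤ N) (i a : Nat) (hi : (i : Int) ≤ 2*N - 2) (ha : a ≤ i) :
    pvStepA N i (pvGrid N N.toNat i a, pvCnt N i + 1 + pvVc N i a) a
      = (pvGrid N N.toNat i (a+1), pvCnt N i + 1 + pvVc N i (a+1)) := by
  have hn : (N.toNat : Int) = N := by omega
  unfold pvStepA
  by_cases h : (a : Int) < N ∧ (i : Int) - a < N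
  · rw [if_pos h]
    have hvc : pvVc N i (a+1) = pvVc N i a + 1 := by unfold pvVc; push_cast; omega
    have htn : ((i : Int) - (a : Int)).toNat = i - a := by omega
    rw [Prod.mk.injEq]
    constructor
    · show (pvGrid N N.toNat i a).modify ((a : Int)).toNat _ = _
      rw [Int.toNat_natCast, htn]
      unfold pvGrid
      rw [pv_modify_set]
      apply List.map_congr_left; intro r hr
      apply List.map_congr_left; intro c hc
      rw [List.mem_range] at hr hc
      by_cases hrc : r = a ∧ c = i - a
      · obtain ⟨h1', h2'⟩ := hrc
        rw [h1', h2']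
        rw [if_pos ⟨rfl, rfl⟩, if_pos (by omega)]
        rw [pvVal_eq N hN a (i - a) (by push_cast [Nat.cast_sub ha]; omega)]
        have hia : a + (i - a) = i := by omega
        rw [hia]
        unfold pvVc
        push_cast [Nat.cast_sub ha]
        omega
      · rw [if_neg hrc]
        exact if_congr (by omega) rfl rfl
    · show pvCnt N i + 1 + pvVc N i a + 1 = _
      rw [hvc]; ring
  · rw [if_neg h]
    push Not at h
    have h1 : pvGrid N N.toNat i a = pvGrid N N.toNat i (a+1) := by
      apply pvGrid_congr
      intro r c hr hc
      omega
    have h2 : pvVc N i a = pvVc N i (a+1) := by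
      unfold pvVc; omega
    rw [h1, h2]

lemma pvInner (N : Int) (hN : 0 ≤ N) (i : Nat) (hi : (i : Int) ≤ 2*N - 2) :
    ∀ b a : Nat, a + b = i + 1 →
      (PySem.List.pyRange a (i+1) 1).foldl (pvStepA N i) (pvGrid N N.toNat i a, pvCnt N i + 1 + pvVc N i a)
        = (pvGrid N N.toNat i (i+1), pvCnt N i + 1 + pvVc N i (i+1)) := by
  intro b
  induction b with
  | zero =>
    intro a hab
    rw [PySem.List.pyRange_one_eq_nil (by omega)]
    have : a = i + 1 := by omega
    subst this
    rfl
  | succ b IH =>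
    intro a hab
    rw [PySem.List.pyRange_one_cons (by omega), List.foldl_cons]
    rw [pvStep_correct N hN i a hi (by omega)]
    rw [show ((a : Int) + 1) = ((a + 1 : Nat) : Int) by push_cast; ring]
    exact IH (a+1) (by omega)

lemma pvCnt_last (N : Int) (hN : 0 ≤ N) : pvCnt N (2 * N.toNat - 1) = N * N := by
  by_cases hz : N.toNat = 0
  · have : N = 0 := by omega
    subst this
    simp [hz, pvCnt]
  · have h := pvCnt_closed N hN (2 * N.toNat - 1) (by omega)
    by_cases h1 : ((2 * N.toNat - 1 : Nat) : Int) ≤ N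
    · rw [if_pos h1] at h
      have hN1 : N = 1 := by omega
      subst hN1
      show pvCnt 1 (2 * (1:Int).toNat - 1) = 1 * 1
      norm_num [pvCnt, pvLen]
    · rw [if_neg h1] at h
      have hc : ((2 * N.toNat - 1 : Nat) : Int) = 2 * N - 1 := by omega
      rw [hc] at h
      nlinarith [h]

lemma pvCnt_lt (N : Int) (hN : 0 ≤ N) (i : Nat) (h : i < 2 * N.toNat - 1) :
    pvCnt N i + 1 ≤ N * N := by
  have hc := pvCnt_closed N hN i (by omega)
  have hi2 : (i : Int) ≤ 2*N - 2 := by omega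
  by_cases h1 : (i : Int) ≤ N
  · rw [if_pos h1] at hc
    nlinarith [hc, mul_nonneg (show (0:Int) ≤ (i:Int) by positivity)
        (show (0:Int) ≤ N - (i:Int) by omega),
      mul_self_nonneg ((i:Int) - 1)]
  · rw [if_neg h1] at hc
    nlinarith [hc, sq_nonneg (2*N - 2 - (i:Int)), show (0:Int) ≤ 2*N - 2 - (i:Int) by omega]

lemma pvVc_zero (N : Int) (i : Nat) : pvVc N i 0 = 0 := by
  unfold pvVc; omega

lemma pvOuter (N : Int) (hN : 0 ≤ N) :
    ∀ fuel i : Nat, 2 * N.toNat - 1 - i < fuel → i ≤ 2 * N.toNat - 1 →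
      pvLoopA N fuel (pvCnt N i + 1) i (pvGrid N N.toNat i 0) = pvGrid N N.toNat (2 * N.toNat - 1) 0 := by
  intro fuel
  induction fuel with
  | zero => intro i h _; omega
  | succ fuel IH =>
    intro i hfuel hi
    rw [pvLoopA]
    by_cases hcond : pvCnt N i + 1 ≤ N * N
    · rw [if_pos hcond]
      have hlt : i < 2 * N.toNat - 1 := by
        rcases Nat.lt_or_ge i (2 * N.toNat - 1) with h | h
        · exact h
        · exfalso
          have : i = 2 * N.toNat - 1 := by omega
          rw [this, pvCnt_last N hN] at hcond
          omega
      have hinner := pvInner N hN i (by omega) (i+1) 0 (by omega)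
      rw [pvVc_zero, add_zero] at hinner
      push_cast at hinner
      rw [hinner]
      have hg : pvGrid N N.toNat i (i+1) = pvGrid N N.toNat (i+1) 0 := by
        apply pvGrid_congr; intro r c hr hc; omega
      have hv : pvCnt N i + 1 + pvVc N i (i+1) = pvCnt N (i+1) + 1 := by
        have hlen : pvVc N i (i+1) = pvLen N i := by
          unfold pvVc pvLen
          have : (N.toNat : Int) = N := by omega
          omega
        rw [hlen]
        show _ = pvCnt N i + pvLen N i + 1
        ring
      rw [hg, hv]
      have := IH (i+1) (by omega) (by omega)
      push_cast at this
      exact this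
    · rw [if_neg hcond]
      have : i = 2 * N.toNat - 1 := by
        rcases Nat.lt_or_ge i (2 * N.toNat - 1) with h | h
        · exact absurd (pvCnt_lt N hN i h) hcond
        · omega
      rw [this]

lemma pvA_eq (N : Int) (hN : 0 ≤ N) : getPettern N = pvGrid N N.toNat (2 * N.toNat - 1) 0 := by
  unfold getPettern
  have h0 : List.replicate N.toNat (List.replicate N.toNat (0:Int)) = pvGrid N N.toNat 0 0 := by
    unfold pvGrid
    apply List.ext_getElem
    · simp
    · intro r h1 h2
      simp
  rw [h0]
  have := pvOuter N hN ((2 * N).toNat + 1) 0 (by omega) (by omega)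
  push_cast at this
  rw [show (1 : Int) = pvCnt N 0 + 1 from rfl]
  exact this

lemma pvB_eq (N : Int) (_hN : 0 ≤ N) : getPettern_alt N = pvGrid N N.toNat (2 * N.toNat - 1) 0 := by
  unfold getPettern_alt pvGrid
  rw [PySem.List.pyRange_one]
  simp only [sub_zero, zero_add, PySem.List.foldl_append_singleton_eq_map,
    List.nil_append, List.map_map]
  apply List.map_congr_left; intro r hr
  simp only [Function.comp_apply]
  apply List.map_congr_left; intro c hc
  rw [List.mem_range] at hr hc
  simp only [Function.comp_apply]
  have : (if (r + c < 2 * N.toNat - 1 ∨ (r + c = 2 * N.toNat - 1 ∧ r < 0)) then pvVal N r c else 0)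
      = pvVal N r c := if_pos (by omega)
  rw [this]
  rfl

-- ===== VERDICT (by name: the statement is the Claim_ definition above) =====
theorem getPettern_spec : Claim_equal_getPettern := by
  intro N _ hPre
  unfold Spec_getPettern
  rw [pvA_eq N hPre, pvB_eq N hPre]
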